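-- pv_equiv track=rewrite | github.com/Kim-menu/coding-test | programmers/problem052.py | solution
-- ===== SOURCE A (Python) =====
-- from collections import deque
--
-- def solution(answers):
--     people = []
--     people.append(deque([1, 2, 3, 4, 5]))
--     people.append(deque([2, 1, 2, 3, 2, 4, 2, 5]))
--     people.append(deque([3, 3, 1, 1, 2, 2, 4, 4, 5, 5]))
--     count = [0, 0, 0]
--     for num in answers:
--         people_sol = []
--         for i in people:
--             people_sol.append(i.popleft())
--         for i, val in enumerate(people_sol):
--             if val == num:
--                 count[i] += 1
--             people[i].append(val)
--     answer = [i+1 for i in range(len(count)) if count[i] == max(count)]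
--     return answer
-- ===== SOURCE B (Python) =====
-- def solution(answers):
--     patterns = ([1, 2, 3, 4, 5],
--                 [2, 1, 2, 3, 2, 4, 2, 5],
--                 [3, 3, 1, 1, 2, 2, 4, 4, 5, 5])
--     count = [sum(a == p[i % len(p)] for i, a in enumerate(answers))
--              for p in patterns]
--     best = max(count)
--     return [j + 1 for j in range(3) if count[j] == best]
-- ===== Notes on version B (the rewrite author's own statement) =====
-- stated objective: idiomatic
-- what changed: Replaces the three mutable rotating deques (popleft/append each step) by stateless positional indexing pattern[i % len(pattern)] in a single comprehension per pattern, with enumerate supplying the position.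
import Mathlib
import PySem

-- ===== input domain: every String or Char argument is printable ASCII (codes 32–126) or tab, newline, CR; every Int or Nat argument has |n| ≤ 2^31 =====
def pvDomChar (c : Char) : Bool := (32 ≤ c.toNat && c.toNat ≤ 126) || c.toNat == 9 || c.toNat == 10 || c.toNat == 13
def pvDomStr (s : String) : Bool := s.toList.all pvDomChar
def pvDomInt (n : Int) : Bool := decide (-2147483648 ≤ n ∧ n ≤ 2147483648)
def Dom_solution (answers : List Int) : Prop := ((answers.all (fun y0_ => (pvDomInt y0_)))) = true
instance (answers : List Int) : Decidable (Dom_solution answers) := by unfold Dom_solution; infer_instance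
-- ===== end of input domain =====

-- B replaces A's three rotating deques by stateless positional indexing pattern[i % len] (idiomatic; same cost).

-- ===== PORT A =====
-- one deque step: popleft, compare, append back ([]-case unreachable: the queues are nonempty constants)
def popStep (num : Int) (qc : List Int × Int) : List Int × Int :=
  match qc with
  | ([], c) => ([], c)
  | (v :: rest, c) => (rest ++ [v], if v = num then c + 1 else c)

def solution (answers : List Int) : List Int :=
  let st := answers.foldl
    (fun st num => (popStep num st.1, popStep num st.2.1, popStep num st.2.2))
    (([1, 2, 3, 4, 5], 0), ([2, 1, 2, 3, 2, 4, 2, 5], 0), ([3, 3, 1, 1, 2, 2, 4, 4, 5, 5], 0))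
  let count : List Int := [st.1.2, st.2.1.2, st.2.2.2]
  let m := (PySem.List.max? count (fun x => x)).getD 0
  ((List.range count.length).filter (fun i => count.getD i 0 = m)).map (fun i => (i : Int) + 1)

-- ===== PORT B =====
-- sum(a == p[i % len(p)] for i, a in enumerate(answers))
def countMatches (p : List Int) (answers : List Int) : Int :=
  (PySem.List.enumerate answers 0).foldl
    (fun c ia => c + if ia.2 = PySem.List.pyGetD p (PySem.Int.mod ia.1 (p.length : Int)) 0 then 1 else 0) 0

def solution_alt (answers : List Int) : List Int :=
  let count := [[1, 2, 3, 4, 5], [2, 1, 2, 3, 2, 4, 2, 5], [3, 3, 1, 1, 2, 2, 4, 4, 5, 5]].map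
    (fun p => countMatches p answers)
  let best := (PySem.List.max? count (fun x => x)).getD 0
  ((List.range 3).filter (fun j => count.getD j 0 = best)).map (fun j => (j : Int) + 1)

-- ===== PRECONDITION & SPEC =====
def Spec_solution (answers : List Int) (out : List Int) : Prop := out = solution_alt answers
instance (answers : List Int) (out : List Int) : Decidable (Spec_solution answers out) := by unfold Spec_solution; infer_instance

-- ===== CLAIM (what is proved, stated in full; the proofs are below) =====
def Claim_equal_solution : Prop := ∀ (answers : List Int), Dom_solution answers → Spec_solution answers (solution answers)

-- ===== LEMMAS AND PROOFS =====

-- B's inner fold is additive in its accumulator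
theorem foldB_init (p : List Int) (l : List (Int × Int)) (c : Int) :
    l.foldl (fun c ia => c + if ia.2 = PySem.List.pyGetD p (PySem.Int.mod ia.1 (p.length : Int)) 0 then 1 else 0) c
    = c + l.foldl (fun c ia => c + if ia.2 = PySem.List.pyGetD p (PySem.Int.mod ia.1 (p.length : Int)) 0 then 1 else 0) 0 := by
  induction l generalizing c with
  | nil => simp
  | cons ia t ih =>
      simp only [List.foldl_cons]
      rw [ih, ih (0 + _)]
      ring

-- a rotated nonempty pattern pops its (k % len)-th element and becomes the (k+1)-rotation
theorem rotate_pop (p : List Int) (hp : p ≠ []) (k : Nat) :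
    ∃ rest, p.rotate k = p.getD (k % p.length) 0 :: rest ∧
      rest ++ [p.getD (k % p.length) 0] = p.rotate (k + 1) := by
  have hlen : 0 < p.length := List.length_pos_iff.mpr hp
  have hne : p.rotate k ≠ [] := by
    simp only [← List.length_pos_iff, List.length_rotate]
    exact hlen
  obtain ⟨v, rest, hvr⟩ := List.exists_cons_of_ne_nil hne
  have hv : v = p.getD (k % p.length) 0 := by
    have h0 : 0 < (p.rotate k).length := by rw [List.length_rotate]; exact hlen
    have hg := List.getElem_rotate p k 0 h0
    simp only [hvr, List.getElem_cons_zero, Nat.zero_add] at hg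
    rw [hg]
    exact (List.getD_eq_getElem p 0 (Nat.mod_lt k hlen)).symm
  refine ⟨rest, by rw [hvr, hv], ?_⟩
  rw [← hv, ← List.rotate_rotate, hvr]
  simpa using (List.rotate_cons_succ rest v 0).symm

theorem if_count (v num c : Int) :
    (if v = num then c + 1 else c) = c + (if num = v then 1 else 0) := by
  rcases eq_or_ne v num with h | h
  · simp [h]
  · simp [h, h.symm]

-- main invariant: A's fold starting from the k-rotation counts c plus B's count over enumerate from k
theorem queue_count (p : List Int) (hp : p ≠ []) (answers : List Int) (k : Nat) (c : Int) :
    (answers.foldl (fun qc num => popStep num qc) (p.rotate k, c)).2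
    = c + (PySem.List.enumerate answers (k : Int)).foldl
        (fun c ia => c + if ia.2 = PySem.List.pyGetD p (PySem.Int.mod ia.1 (p.length : Int)) 0 then 1 else 0) 0 := by
  induction answers generalizing k c with
  | nil => simp [PySem.List.enumerate_nil]
  | cons num rest ih =>
      obtain ⟨q, h1, h2⟩ := rotate_pop p hp k
      have hpg : PySem.List.pyGetD p (PySem.Int.mod (k : Int) (p.length : Int)) 0
          = p.getD (k % p.length) 0 := by
        simp only [PySem.Int.mod_natCast, PySem.List.pyGetD_natCast]
      have hstep : popStep num (p.rotate k, c)
          = (p.rotate (k + 1),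
             c + if num = PySem.List.pyGetD p (PySem.Int.mod (k : Int) (p.length : Int)) 0 then 1 else 0) := by
        rw [h1]
        simp only [popStep, hpg, Prod.mk.injEq]
        exact ⟨h2, if_count _ _ _⟩
      have hcast : ((k : Int) + 1) = ((k + 1 : Nat) : Int) := by push_cast; ring
      rw [List.foldl_cons, hstep, ih, PySem.List.enumerate_cons, List.foldl_cons, hcast]
      conv_rhs => rw [foldB_init]
      ring
-- the fold over the triple of queues is three independent folds
theorem triple_fold (answers : List Int) (s1 s2 s3 : List Int × Int) :
    answers.foldl (fun st num => (popStep num st.1, popStep num st.2.1, popStep num st.2.2))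
        (s1, s2, s3)
    = (answers.foldl (fun qc num => popStep num qc) s1,
       answers.foldl (fun qc num => popStep num qc) s2,
       answers.foldl (fun qc num => popStep num qc) s3) := by
  induction answers generalizing s1 s2 s3 with
  | nil => rfl
  | cons a t ih => simp only [List.foldl_cons]; exact ih _ _ _

-- ===== VERDICT (by name: the statement is the Claim_ definition above) =====
theorem solution_spec : Claim_equal_solution := by
  intro answers _
  show solution answers = solution_alt answers
  unfold solution solution_alt countMatches
  rw [triple_fold]
  have e1 := queue_count [1, 2, 3, 4, 5] (by simp) answers 0 0
  have e2 := queue_count [2, 1, 2, 3, 2, 4, 2, 5] (by simp) answers 0 0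
  have e3 := queue_count [3, 3, 1, 1, 2, 2, 4, 4, 5, 5] (by simp) answers 0 0
  simp only [List.rotate_zero, Nat.cast_zero, zero_add] at e1 e2 e3
  simp [e1, e2, e3]
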